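-- pv_equiv track=rewrite | github.com/tranhaduy9824/detect_transaction | create_model.py | is_large_transactions_consecutive
-- ===== SOURCE A (Python) =====
-- def is_large_transactions_consecutive(rolling_history, customer_id, threshold=3000, count=3):
--     history = [amt for amt, _ in rolling_history.get(customer_id, [])]
--     if len(history) < count:
--         return False, ""
--
--     # Kiểm tra 3 giao dịch liên tiếp vượt ngưỡng
--     for i in range(len(history) - count + 1):
--         if all(amount >= threshold for amount in history[i:i+count]):
--             return True, f"3 giao dịch liên tiếp số tiền lớn hơn {threshold}."
--     return False, ""
-- ===== SOURCE B (Python) =====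
-- def is_large_transactions_consecutive(rolling_history, customer_id, threshold=3000, count=3):
--     message = f"3 giao dịch liên tiếp số tiền lớn hơn {threshold}."
--     if count <= 0:
--         # a run of non-positive length trivially exists
--         return True, message
--     streak = 0
--     for amount, _ in rolling_history.get(customer_id, []):
--         streak = streak + 1 if amount >= threshold else 0
--         if streak == count:
--             return True, message
--     return False, ""
-- ===== Notes on version B (the rewrite author's own statement) =====
-- stated objective: simpler
-- what changed: Replaces the windowed scan (for every start index, re-test all `count` amounts of the slice with all()) by a single linear pass that maintains a running streak counter of consecutive amounts >= threshold, returning as soon as the streak reaches count; count <= 0 trivially succeeds (as A's vacuous all() does).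
import Mathlib
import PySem

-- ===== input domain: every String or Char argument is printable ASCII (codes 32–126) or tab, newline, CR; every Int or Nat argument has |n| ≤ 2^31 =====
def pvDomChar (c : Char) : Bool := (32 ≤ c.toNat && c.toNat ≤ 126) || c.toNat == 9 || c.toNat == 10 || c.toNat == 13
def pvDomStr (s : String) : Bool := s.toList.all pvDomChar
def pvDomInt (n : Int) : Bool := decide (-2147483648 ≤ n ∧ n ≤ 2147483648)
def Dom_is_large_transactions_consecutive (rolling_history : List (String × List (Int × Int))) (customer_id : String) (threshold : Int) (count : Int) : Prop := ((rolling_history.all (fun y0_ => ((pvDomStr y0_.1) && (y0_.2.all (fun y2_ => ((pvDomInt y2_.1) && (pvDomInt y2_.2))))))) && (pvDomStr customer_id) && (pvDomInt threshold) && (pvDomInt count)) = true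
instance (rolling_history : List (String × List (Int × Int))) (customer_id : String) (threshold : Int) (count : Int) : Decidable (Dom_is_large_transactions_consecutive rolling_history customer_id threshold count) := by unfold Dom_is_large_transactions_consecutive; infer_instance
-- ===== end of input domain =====

-- B replaces A's windowed all()-rescan with a single pass keeping a running streak counter (simpler, one pass).

-- the constant message f"3 giao dịch liên tiếp số tiền lớn hơn {threshold}." (shared constant of both ports)
def pvMsg (threshold : Int) : String :=
  "3 giao dịch liên tiếp số tiền lớn hơn " ++ PySem.Int.toStr threshold ++ "."

-- ===== PORT A =====
-- the "for i in range(...)" loop: return at the first window history[i:i+count] that is all >= threshold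
def pvLoopA (history : List Int) (threshold count : Int) : List Int → Bool × String
  | [] => (false, "")
  | i :: rest =>
    if (PySem.List.slice history (some i) (some (i + count))).all
        (fun amount => decide (threshold ≤ amount)) then
      (true, pvMsg threshold)
    else
      pvLoopA history threshold count rest

def is_large_transactions_consecutive (rolling_history : List (String × List (Int × Int))) (customer_id : String) (threshold : Int) (count : Int) : Bool × String :=
  let history := ((PySem.Dict.ofList rolling_history).getD customer_id []).map Prod.fst
  if (history.length : Int) < count then (false, "")
  else
    pvLoopA history threshold count
      (PySem.List.pyRange 0 ((history.length : Int) - count + 1) 1)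

-- ===== PORT B =====
-- the single pass: streak = streak+1 if amount >= threshold else 0; return as soon as streak == count
def pvLoopB (threshold count : Int) (message : String) (streak : Int) : List (Int × Int) → Bool × String
  | [] => (false, "")
  | (amount, _) :: rest =>
    let streak' := if threshold ≤ amount then streak + 1 else 0
    if streak' = count then (true, message)
    else pvLoopB threshold count message streak' rest

def is_large_transactions_consecutive_alt (rolling_history : List (String × List (Int × Int))) (customer_id : String) (threshold : Int) (count : Int) : Bool × String :=
  let message := pvMsg threshold
  if count ≤ 0 then (true, message)   -- a run of non-positive length trivially exists
  else pvLoopB threshold count message 0 ((PySem.Dict.ofList rolling_history).getD customer_id [])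

-- ===== PRECONDITION & SPEC =====
def Spec_is_large_transactions_consecutive (rolling_history : List (String × List (Int × Int))) (customer_id : String) (threshold : Int) (count : Int) (out : Bool × String) : Prop := out = is_large_transactions_consecutive_alt rolling_history customer_id threshold count
instance (rolling_history : List (String × List (Int × Int))) (customer_id : String) (threshold : Int) (count : Int) (out : Bool × String) : Decidable (Spec_is_large_transactions_consecutive rolling_history customer_id threshold count out) := by unfold Spec_is_large_transactions_consecutive; infer_instance

-- ===== CLAIM (what is proved, stated in full; the proofs are below) =====
def Claim_equal_is_large_transactions_consecutive : Prop := ∀ (rolling_history : List (String × List (Int × Int))) (customer_id : String) (threshold : Int) (count : Int), Dom_is_large_transactions_consecutive rolling_history customer_id threshold count → Spec_is_large_transactions_consecutive rolling_history customer_id threshold count (is_large_transactions_consecutive rolling_history customer_id threshold count)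

-- ===== LEMMAS AND PROOFS =====

-- "some window of c consecutive elements of l is entirely >= t"
def pvHasRun (t : Int) (c : Nat) (l : List Int) : Prop :=
  ∃ i : Nat, i + c ≤ l.length ∧ ∀ x ∈ (l.drop i).take c, t ≤ x

theorem pvMem_take_mono {α : Type} {l : List α} {m n : Nat} {x : α} (h : m ≤ n)
    (hx : x ∈ l.take m) : x ∈ l.take n := by
  have : l.take m = (l.take n).take m := by
    rw [List.take_take, Nat.min_eq_left h]
  rw [this] at hx
  exact List.take_subset _ _ hx

theorem pvHasRun_cons_of (t : Int) (c : Nat) (a : Int) (l : List Int)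
    (h : pvHasRun t c l) : pvHasRun t c (a :: l) := by
  obtain ⟨i, hi, hall⟩ := h
  exact ⟨i + 1, by simp; omega, by simpa using hall⟩

theorem pvHasRun_cons_elim (t : Int) (c : Nat) (a : Int) (l : List Int) (_hc : 1 ≤ c)
    (h : pvHasRun t c (a :: l)) :
    (c ≤ l.length + 1 ∧ ∀ x ∈ (a :: l).take c, t ≤ x) ∨ pvHasRun t c l := by
  obtain ⟨i, hi, hall⟩ := h
  cases i with
  | zero => left; exact ⟨by simpa using hi, by simpa using hall⟩
  | succ j => right; exact ⟨j, by simp at hi ⊢; omega, by simpa using hall⟩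

theorem pvSpec0_iff (t : Int) (c : Nat) (l : List Int) :
    ((c ≤ l.length ∧ ∀ x ∈ l.take c, t ≤ x) ∨ pvHasRun t c l) ↔ pvHasRun t c l := by
  constructor
  · rintro (⟨h1, h2⟩ | h)
    · exact ⟨0, by simpa using h1, by simpa using h2⟩
    · exact h
  · intro h; right; exact h

theorem pvLoopA_true_iff (history : List Int) (t c : Int) (is : List Int) :
    pvLoopA history t c is = (true, pvMsg t) ↔
      ∃ i ∈ is, (PySem.List.slice history (some i) (some (i + c))).all
        (fun amount => decide (t ≤ amount)) = true := by
  induction is with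
  | nil => simp [pvLoopA]
  | cons i rest ih =>
    simp only [pvLoopA]
    by_cases h : (PySem.List.slice history (some i) (some (i + c))).all
        (fun amount => decide (t ≤ amount)) = true
    · rw [if_pos h]
      constructor
      · intro _; exact ⟨i, List.mem_cons_self, h⟩
      · intro _; rfl
    · rw [if_neg h, ih]
      constructor
      · rintro ⟨j, hj, hall⟩; exact ⟨j, List.mem_cons_of_mem _ hj, hall⟩
      · rintro ⟨j, hj, hall⟩
        rcases List.mem_cons.mp hj with rfl | hj'
        · exact absurd hall h
        · exact ⟨j, hj', hall⟩

theorem pvLoopA_shape (history : List Int) (t c : Int) (is : List Int) :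
    pvLoopA history t c is = (true, pvMsg t) ∨ pvLoopA history t c is = (false, "") := by
  induction is with
  | nil => right; rfl
  | cons i rest ih =>
    simp only [pvLoopA]
    split
    · left; rfl
    · exact ih

theorem pvLoopB_shape (t c : Int) (m : String) (s : Int) (l : List (Int × Int)) :
    pvLoopB t c m s l = (true, m) ∨ pvLoopB t c m s l = (false, "") := by
  induction l generalizing s with
  | nil => right; rfl
  | cons p rest ih =>
    obtain ⟨a, b⟩ := p
    simp only [pvLoopB]
    split
    · split
      · left; rfl
      · exact ih _
    · split
      · left; rfl
      · exact ih _

theorem pvSpec0_iff' (t : Int) (c : Nat) (l : List (Int × Int)) :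
    ((c ≤ l.length ∧ ∀ x ∈ (l.map Prod.fst).take c, t ≤ x) ∨ pvHasRun t c (l.map Prod.fst))
      ↔ pvHasRun t c (l.map Prod.fst) := by
  rw [show l.length = (l.map Prod.fst).length by simp]
  exact pvSpec0_iff t c (l.map Prod.fst)

-- streak-loop invariant: with 0 ≤ s < c already accumulated, the loop succeeds iff either the
-- first (c - s) amounts are all >= t, or some full window of c amounts occurs in the list
theorem pvLoopB_true_iff (t c : Int) (m : String) (hc : 1 ≤ c) :
    ∀ (l : List (Int × Int)) (s : Int), 0 ≤ s → s < c →
      (pvLoopB t c m s l = (true, m) ↔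
        (((c - s).toNat ≤ l.length ∧ ∀ x ∈ (l.map Prod.fst).take (c - s).toNat, t ≤ x)
          ∨ pvHasRun t c.toNat (l.map Prod.fst))) := by
  intro l
  induction l with
  | nil =>
    intro s hs0 hsc
    simp only [pvLoopB, List.map_nil, List.length_nil]
    constructor
    · intro h; exact absurd h (by simp)
    · rintro (⟨h1, _⟩ | ⟨i, hi, _⟩)
      · omega
      · simp only [List.length_nil] at hi; omega
  | cons p rest ih =>
    obtain ⟨a, b⟩ := p
    intro s hs0 hsc
    simp only [pvLoopB]
    by_cases hta : t ≤ a
    · rw [if_pos hta]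
      by_cases heq : s + 1 = c
      · rw [if_pos heq]
        constructor
        · intro _
          left
          have h1 : (c - s).toNat = 1 := by omega
          refine ⟨by simp [h1], ?_⟩
          intro x hx
          rw [h1] at hx
          simp only [List.map_cons, List.take_succ_cons, List.take_zero,
            List.mem_singleton] at hx
          exact hx ▸ hta
        · intro _; rfl
      · rw [if_neg heq]
        rw [ih (s + 1) (by omega) (by omega)]
        have hsplit : (c - s).toNat = (c - (s + 1)).toNat + 1 := by omega
        constructor
        · -- invariant for (s+1, rest) gives the claim for (s, (a,b)::rest)
          rintro (⟨h1, h2⟩ | hr)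
          · left
            refine ⟨by simp only [List.length_cons]; omega, ?_⟩
            intro x hx
            rw [hsplit] at hx
            simp only [List.map_cons, List.take_succ_cons, List.mem_cons] at hx
            rcases hx with rfl | hx
            · exact hta
            · exact h2 x hx
          · right
            simpa using pvHasRun_cons_of t c.toNat a (rest.map Prod.fst) hr
        · rintro (⟨h1, h2⟩ | hr)
          · left
            refine ⟨by simp only [List.length_cons] at h1; omega, ?_⟩
            intro x hx
            apply h2
            rw [hsplit]
            simp only [List.map_cons, List.take_succ_cons]
            exact List.mem_cons_of_mem _ hx
          · rcases pvHasRun_cons_elim t c.toNat a (rest.map Prod.fst) (by omega)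
                (by simpa using hr) with ⟨hl, hall⟩ | hr'
            · left
              refine ⟨by simp only [List.length_map] at hl ⊢; omega, ?_⟩
              intro x hx
              apply hall
              refine pvMem_take_mono (m := (c - (s + 1)).toNat + 1) (n := c.toNat) (by omega) ?_
              simp only [List.take_succ_cons]
              exact List.mem_cons_of_mem _ hx
            · right; exact hr'
    · rw [if_neg hta]
      rw [if_neg (show ¬ ((0 : Int) = c) by omega)]
      rw [ih 0 le_rfl (by omega)]
      rw [show ((c - 0 : Int)).toNat = c.toNat by omega, pvSpec0_iff']
      constructor
      · intro hr
        right
        simpa using pvHasRun_cons_of t c.toNat a (rest.map Prod.fst) hr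
      · rintro (⟨h1, h2⟩ | hr)
        · -- impossible: the first (c - s) amounts would include a < t
          exfalso
          apply hta
          apply h2
          rw [show (c - s).toNat = ((c - s).toNat - 1) + 1 by omega]
          simp only [List.map_cons, List.take_succ_cons]
          exact List.mem_cons_self
        · rcases pvHasRun_cons_elim t c.toNat a (rest.map Prod.fst) (by omega)
              (by simpa using hr) with ⟨hl, hall⟩ | hr'
          · exfalso
            apply hta
            apply hall
            rw [show c.toNat = (c.toNat - 1) + 1 by omega]
            simp only [List.take_succ_cons]
            exact List.mem_cons_self
          · exact hr'

-- A's windowed scan succeeds iff some window exists (for 1 ≤ count)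
theorem pvLoopA_range_iff (history : List Int) (t c : Int) (hc : 1 ≤ c)
    (hlen : c ≤ (history.length : Int)) :
    pvLoopA history t c (PySem.List.pyRange 0 ((history.length : Int) - c + 1) 1)
        = (true, pvMsg t) ↔ pvHasRun t c.toNat history := by
  rw [pvLoopA_true_iff]
  constructor
  · rintro ⟨x, hxmem, hall⟩
    rw [PySem.List.mem_pyRange_one] at hxmem
    obtain ⟨hx0, hxlt⟩ := hxmem
    refine ⟨x.toNat, by omega, ?_⟩
    intro y hy
    have hslice : PySem.List.slice history (some x) (some (x + c))
        = (history.drop x.toNat).take ((x + c).toNat - x.toNat) :=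
      PySem.List.slice_toNat history hx0 (by omega)
    have hnat : (x + c).toNat - x.toNat = c.toNat := by omega
    rw [hslice, hnat] at hall
    have := List.all_eq_true.mp hall y hy
    simpa using this
  · rintro ⟨i, hi, hall⟩
    refine ⟨(i : Int), ?_, ?_⟩
    · rw [PySem.List.mem_pyRange_one]
      constructor
      · exact Int.natCast_nonneg i
      · omega
    · have hslice : PySem.List.slice history (some (i : Int)) (some ((i : Int) + c))
        = (history.drop ((i : Int)).toNat).take (((i : Int) + c).toNat - ((i : Int)).toNat) :=
        PySem.List.slice_toNat history (Int.natCast_nonneg i) (by omega)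
      have hnat : ((i : Int) + c).toNat - ((i : Int)).toNat = c.toNat := by omega
      rw [hslice, hnat, Int.toNat_natCast]
      rw [List.all_eq_true]
      intro y hy
      simpa using hall y hy

-- ===== VERDICT (by name: the statement is the Claim_ definition above) =====
theorem is_large_transactions_consecutive_spec : Claim_equal_is_large_transactions_consecutive := by
  intro rh cid t c _dom
  unfold Spec_is_large_transactions_consecutive
  unfold is_large_transactions_consecutive is_large_transactions_consecutive_alt
  set l := (PySem.Dict.ofList rh).getD cid [] with hl
  simp only []
  by_cases hc0 : c ≤ 0
  · -- count <= 0: both return (true, msg)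
    rw [if_pos hc0]
    have hnl : ¬ (((l.map Prod.fst).length : Int) < c) := by
      have : (0 : Int) ≤ ((l.map Prod.fst).length : Int) := by positivity
      omega
    rw [if_neg hnl]
    rw [pvLoopA_true_iff]
    refine ⟨-c, ?_, ?_⟩
    · rw [PySem.List.mem_pyRange_one]
      constructor
      · omega
      · have : (0 : Int) ≤ ((l.map Prod.fst).length : Int) := by positivity
        omega
    · have : PySem.List.slice (l.map Prod.fst) (some (-c)) (some (-c + c))
          = ((l.map Prod.fst).drop (-c).toNat).take ((-c + c).toNat - (-c).toNat) :=
        PySem.List.slice_toNat _ (by omega) (by omega)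
      rw [this]
      have : (-c + c).toNat - (-c).toNat = 0 := by omega
      rw [this]
      simp
  · -- count >= 1
    have hc1 : 1 ≤ c := by omega
    rw [if_neg hc0]
    have hB := pvLoopB_true_iff t c (pvMsg t) hc1 l 0 le_rfl (by omega)
    have hzero : ((c - 0 : Int)).toNat = c.toNat := by omega
    rw [hzero] at hB
    rw [pvSpec0_iff'] at hB
    by_cases hlen : (((l.map Prod.fst).length : Int) < c)
    · rw [if_pos hlen]
      have hnr : ¬ pvHasRun t c.toNat (l.map Prod.fst) := by
        rintro ⟨i, hi, -⟩
        omega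
      rcases pvLoopB_shape t c (pvMsg t) 0 l with hb | hb
      · exact absurd (hB.mp hb) hnr
      · rw [hb]
    · rw [if_neg hlen]
      have hA := pvLoopA_range_iff (l.map Prod.fst) t c hc1 (by omega)
      rcases pvLoopA_shape (l.map Prod.fst) t c
          (PySem.List.pyRange 0 (((l.map Prod.fst).length : Int) - c + 1) 1) with ha | ha
      · rw [ha, hB.mpr (hA.mp ha)]
      · rw [ha]
        rcases pvLoopB_shape t c (pvMsg t) 0 l with hb | hb
        · exact absurd (hA.mpr (hB.mp hb)) (by rw [ha]; simp)
        · rw [hb]
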